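-- pv_equiv track=rewrite | github.com/simyeen/algorithms | codebook/programmers/level2/19.py | solution
-- ===== SOURCE A (Python) =====
-- def solution(numbers):
--     answer = []
--     test = []
--
--     for n in numbers:
--         target = bin(n)[2:]
--         index = target.rfind('0')
--         test.append(index)
--         if index != -1: # 제일 마지막 1전에 0이 존재할때
--             target = target[:index] + '1' + target[index+1:]
--             answer.append(int(target,2))
--         else :
--             if int(target,2) == 1 : answer.append(2)
--             elif int(target,2) == 3: answer.append(5)
--             else:
--                 target = '10'+ '1'*(len(target)-1)
--                 answer.append(int(target,2))
--     return answer
-- ===== SOURCE B (Python) =====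
-- def solution(numbers):
--     out = []
--     for n in numbers:
--         if n > 0 and n & (n + 1) == 0:
--             # n is all ones in binary: answer is '10' + '1'*(k-1)
--             out.append(3 * (1 << (n.bit_length() - 1)) - 1)
--         else:
--             # set the least-significant zero bit
--             out.append(n | (n + 1))
--     return out
-- ===== Notes on version B (the rewrite author's own statement) =====
-- stated objective: simpler
-- what changed: Replaces the binary-string build/rfind/slice/int-parse per element by closed-form integer bit arithmetic: all-ones numbers (n&(n+1)==0) map to 3*2^(bit_length-1)-1, all others to n|(n+1); the dead 'test' list is dropped.
import Mathlib
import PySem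

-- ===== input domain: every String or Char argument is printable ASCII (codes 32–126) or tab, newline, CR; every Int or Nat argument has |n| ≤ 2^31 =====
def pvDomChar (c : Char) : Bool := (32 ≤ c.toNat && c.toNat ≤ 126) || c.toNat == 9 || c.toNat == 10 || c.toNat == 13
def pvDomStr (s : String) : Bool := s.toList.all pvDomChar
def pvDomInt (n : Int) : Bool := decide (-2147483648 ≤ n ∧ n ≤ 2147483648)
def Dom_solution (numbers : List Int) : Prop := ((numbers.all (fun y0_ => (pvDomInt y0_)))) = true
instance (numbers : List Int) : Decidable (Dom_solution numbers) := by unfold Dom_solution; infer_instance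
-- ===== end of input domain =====

-- B replaces A's per-element binary-string build / rfind / slice / int-parse by closed-form
-- integer bit arithmetic (objective: simpler). A's dead 'test' list (never returned) is not ported.

-- ===== PORT A =====
-- bin(m)[2:] for m ≥ 0, exact (Python: bin(0) = '0b0', so binChars 0 = ['0'])
def binChars (m : Nat) : List Char :=
  if m < 2 then [if m = 1 then '1' else '0']
  else binChars (m / 2) ++ [if m % 2 = 1 then '1' else '0']
decreasing_by exact Nat.div_lt_self (by omega) (by omega)

-- target.rfind('0'): index of the last '0', or -1 (Python returns an int)
def rfindZero : List Char → Int
  | [] => -1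
  | c :: t =>
    if rfindZero t ≠ -1 then rfindZero t + 1 else if c = '0' then 0 else -1

-- int(s, 2): exact on strings of '0'/'1' digits, the only ones A builds
def parseBin (s : List Char) : Nat :=
  s.foldl (fun a c => 2 * a + (if c = '1' then 1 else 0)) 0

-- target[:i] + '1' + target[i+1:] for 0 ≤ i < len target (the only way A calls it)
def flipAt (s : List Char) (i : Nat) : List Char :=
  s.take i ++ ['1'] ++ s.drop (i + 1)

-- one loop-body iteration of A; Pre_ gives n ≥ 0 (Python raises ValueError on n < 0)
def stepA (n : Int) : Int :=
  let target := binChars n.toNat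
  let index := rfindZero target
  if index ≠ -1 then
    ((parseBin (flipAt target index.toNat) : Nat) : Int)
  else if ((parseBin target : Nat) : Int) = 1 then 2
  else if ((parseBin target : Nat) : Int) = 3 then 5
  else ((parseBin (['1', '0'] ++ List.replicate (target.length - 1) '1') : Nat) : Int)

def solution (numbers : List Int) : List Int :=
  numbers.foldl (fun answer n => answer ++ [stepA n]) []

-- ===== PORT B =====
-- n.bit_length() for n ≥ 0
def bitLen (m : Nat) : Nat :=
  if m = 0 then 0 else bitLen (m / 2) + 1
decreasing_by exact Nat.div_lt_self (by omega) (by omega)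

-- one loop-body iteration of B (bit_length is only reached when n > 0, where n.toNat = n)
def stepB (n : Int) : Int :=
  if 0 < n ∧ Int.land n (n + 1) = 0 then 3 * 2 ^ (bitLen n.toNat - 1) - 1
  else Int.lor n (n + 1)

def solution_alt (numbers : List Int) : List Int :=
  numbers.foldl (fun out n => out ++ [stepB n]) []

-- ===== PRECONDITION & SPEC =====
-- Pre_ excludes negative numbers: there A raises ValueError (bin(-k)[2:] = 'b…' fails int(·,2)).
def Pre_solution (numbers : List Int) : Prop := ∀ n ∈ numbers, 0 ≤ n
instance (numbers : List Int) : Decidable (Pre_solution numbers) := by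
  unfold Pre_solution; infer_instance

def pvWitness_solution : List Int := [0, 1, 2, 3, 6, 7, 12]

def Spec_solution (numbers : List Int) (out : List Int) : Prop := out = solution_alt numbers
instance (numbers : List Int) (out : List Int) : Decidable (Spec_solution numbers out) := by
  unfold Spec_solution; infer_instance

-- ===== CLAIM (what is proved, stated in full; the proofs are below) =====
def Claim_equal_solution : Prop :=
  ∀ (numbers : List Int), Dom_solution numbers → Pre_solution numbers →
    Spec_solution numbers (solution numbers)

-- ===== LEMMAS AND PROOFS =====

theorem int_land_coe (a b : Nat) : Int.land (a : Int) (b : Int) = ((a &&& b : Nat) : Int) := rfl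
theorem int_lor_coe (a b : Nat) : Int.lor (a : Int) (b : Int) = ((a ||| b : Nat) : Int) := rfl

theorem parse_append (s : List Char) (c : Char) :
    parseBin (s ++ [c]) = 2 * parseBin s + (if c = '1' then 1 else 0) := by
  simp [parseBin, List.foldl_append]

theorem parse_binChars (m : Nat) : parseBin (binChars m) = m := by
  induction m using Nat.strong_induction_on with
  | _ m IH =>
    rw [binChars]
    by_cases h : m < 2
    · interval_cases m <;> simp [parseBin]
    · rw [if_neg h, parse_append, IH (m / 2) (Nat.div_lt_self (by omega) (by omega))]
      by_cases hm : m % 2 = 1 <;> simp [hm] <;> omega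

theorem length_binChars (m : Nat) (h : 1 ≤ m) : (binChars m).length = bitLen m := by
  induction m using Nat.strong_induction_on with
  | _ m IH =>
    rw [binChars, bitLen]
    by_cases h2 : m < 2
    · have : m = 1 := by omega
      subst this
      simp [bitLen]
    · rw [if_neg h2, if_neg (by omega : ¬ m = 0)]
      simp [IH (m / 2) (Nat.div_lt_self (by omega) (by omega)) (by omega)]

theorem binChars_length_pos (m : Nat) : 1 ≤ (binChars m).length := by
  rw [binChars]
  split_ifs <;> simp

theorem binChars_digits (m : Nat) : ∀ c ∈ binChars m, c = '0' ∨ c = '1' := by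
  induction m using Nat.strong_induction_on with
  | _ m IH =>
    rw [binChars]
    by_cases h : m < 2
    · rw [if_pos h]; intro c hc; split_ifs at hc <;> simp_all
    · rw [if_neg h]
      intro c hc
      rcases List.mem_append.1 hc with h1 | h1
      · exact IH (m / 2) (Nat.div_lt_self (by omega) (by omega)) c h1
      · split_ifs at h1 <;> simp_all

theorem rfind_bounds (s : List Char) : -1 ≤ rfindZero s ∧ rfindZero s < s.length := by
  induction s with
  | nil => simp [rfindZero]
  | cons c t IH =>
    rw [rfindZero]
    split_ifs <;> simp <;> omega

theorem rfind_append (s : List Char) (c : Char) :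
    rfindZero (s ++ [c]) = if c = '0' then (s.length : Int) else rfindZero s := by
  induction s with
  | nil => simp [rfindZero]
  | cons a t IH =>
    have hb := rfind_bounds t
    rw [List.cons_append, rfindZero, IH]
    by_cases hc : c = '0'
    · rw [if_pos hc, if_pos hc, if_pos (show ((t.length : Nat) : Int) ≠ -1 by omega)]
      simp [List.length_cons]
    · rw [if_neg hc, if_neg hc]
      conv_rhs => rw [rfindZero]

theorem rfind_neg1_iff (s : List Char) : rfindZero s = -1 ↔ '0' ∉ s := by
  induction s with
  | nil => simp [rfindZero]
  | cons c t IH =>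
    have hb := rfind_bounds t
    rw [rfindZero]
    simp only [List.mem_cons]
    split_ifs with h1 h2
    · have hz : '0' ∈ t := by
        by_contra hzz
        exact h1 (IH.2 hzz)
      constructor
      · intro hh; exfalso; omega
      · intro hh; exact absurd (Or.inr hz) hh
    · constructor
      · intro hh; exfalso; omega
      · intro hh; exact absurd (Or.inl h2.symm) hh
    · simp only [ne_eq, not_not] at h1
      constructor
      · intro _
        rintro (hh | hh)
        · exact h2 hh.symm
        · exact (IH.1 h1) hh
      · intro _; rfl

theorem parse_ones (s : List Char) (j : Nat) :
    parseBin (s ++ List.replicate j '1') + 1 = (parseBin s + 1) * 2 ^ j := by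
  induction j with
  | zero => simp
  | succ j IH =>
    rw [List.replicate_succ', ← List.append_assoc, parse_append, pow_succ]
    have h2 : (parseBin s + 1) * (2 ^ j * 2) = 2 * ((parseBin s + 1) * 2 ^ j) := by ring
    norm_num
    omega

-- the bit recurrences of ||| and &&& we use, specialised
theorem lor_even_odd (k : Nat) : 2 * k ||| (2 * k + 1) = 2 * k + 1 := by
  have := Nat.lor_bit false k true k
  simpa [Nat.bit_val, Nat.or_self] using this

theorem land_even_odd (k : Nat) : 2 * k &&& (2 * k + 1) = 2 * k := by
  have := Nat.land_bit false k true k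
  simpa [Nat.bit_val, Nat.and_self] using this

theorem lor_odd_even (k : Nat) : (2 * k + 1) ||| (2 * (k + 1)) = 2 * (k ||| (k + 1)) + 1 := by
  have := Nat.lor_bit true k false (k + 1)
  simpa [Nat.bit_val] using this

theorem land_odd_even (k : Nat) : (2 * k + 1) &&& (2 * (k + 1)) = 2 * (k &&& (k + 1)) := by
  have := Nat.land_bit true k false (k + 1)
  simpa [Nat.bit_val] using this

theorem zero_mem_iff (m : Nat) (h : 1 ≤ m) : '0' ∈ binChars m ↔ m &&& (m + 1) ≠ 0 := by
  induction m using Nat.strong_induction_on with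
  | _ m IH =>
    by_cases h2 : m < 2
    · have : m = 1 := by omega
      subst this
      rw [binChars]
      norm_num
      decide
    · have hrec : binChars m = binChars (m / 2) ++ [if m % 2 = 1 then '1' else '0'] := by
        rw [binChars]; rw [if_neg h2]
      have hk : 1 ≤ m / 2 := by omega
      have IH2 := IH (m / 2) (Nat.div_lt_self (by omega) (by omega)) hk
      by_cases ho : m % 2 = 1
      · -- odd
        have hand : m &&& (m + 1) = 2 * (m / 2 &&& (m / 2 + 1)) := by
          obtain ⟨k, hk⟩ : ∃ k, m = 2 * k + 1 := ⟨m / 2, by omega⟩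
          have hq : m / 2 = k := by omega
          rw [hq, hk, show 2 * k + 1 + 1 = 2 * (k + 1) by ring]
          exact land_odd_even k
        rw [hrec, hand, if_pos ho]
        simp only [List.mem_append, List.mem_singleton]
        constructor
        · rintro (hz | hz)
          · have := IH2.1 hz; omega
          · exact absurd hz (by decide)
        · intro hne
          exact Or.inl (IH2.2 (by omega))
      · -- even
        have hand : m &&& (m + 1) = 2 * (m / 2) := by
          obtain ⟨k, hk⟩ : ∃ k, m = 2 * k := ⟨m / 2, by omega⟩
          have hq : m / 2 = k := by omega
          rw [hq, hk, show 2 * k + 1 = 2 * k + 1 from rfl]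
          exact land_even_odd k
        rw [hrec, hand, if_neg ho]
        simp only [List.mem_append, List.mem_singleton]
        constructor
        · intro _; omega
        · intro _
          right
          simp

theorem key (m : Nat) : stepA (m : Int) = stepB (m : Int) := by
  induction m using Nat.strong_induction_on with
  | _ m IH =>
    by_cases h4 : m < 4
    · have b0 : binChars 0 = ['0'] := by rw [binChars]; norm_num
      have b1 : binChars 1 = ['1'] := by rw [binChars]; norm_num
      have b2 : binChars 2 = ['1', '0'] := by rw [binChars]; norm_num [b1]
      have b3 : binChars 3 = ['1', '1'] := by rw [binChars]; norm_num [b1]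
      have l0 : bitLen 0 = 0 := by rw [bitLen]; norm_num
      have l1 : bitLen 1 = 1 := by rw [bitLen]; norm_num [l0]
      have l3 : bitLen 3 = 2 := by rw [bitLen]; norm_num [l1]
      interval_cases m <;>
        norm_num [stepA, stepB, b0, b1, b2, b3, l1, l3, rfindZero, parseBin, flipAt,
          Int.lor, Int.land, show (0:Int).toNat = 0 from rfl, show (1:Int).toNat = 1 from rfl,
          show (2:Int).toNat = 2 from rfl, show (3:Int).toNat = 3 from rfl] <;>
        decide
    · have hk2 : 2 ≤ m / 2 := by omega
      have hps : parseBin (binChars (m / 2)) = m / 2 := parse_binChars (m / 2)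
      have hsl : 1 ≤ (binChars (m / 2)).length := binChars_length_pos (m / 2)
      have hrec : binChars m = binChars (m / 2) ++ [if m % 2 = 1 then '1' else '0'] := by
        rw [binChars]; rw [if_neg (by omega : ¬ m < 2)]
      have hcast1 : ((m : Int) + 1) = ((m + 1 : Nat) : Int) := by push_cast; ring
      by_cases ho : m % 2 = 1
      · -- ODD m: last char '1', recurse on k = m / 2
        have ht : binChars m = binChars (m / 2) ++ ['1'] := by rw [hrec, if_pos ho]
        have hr : rfindZero (binChars m) = rfindZero (binChars (m / 2)) := by
          rw [ht, rfind_append, if_neg (by decide)]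
        have hland : m &&& (m + 1) = 2 * (m / 2 &&& (m / 2 + 1)) := by
          obtain ⟨k, hk⟩ : ∃ k, m = 2 * k + 1 := ⟨m / 2, by omega⟩
          have hq : m / 2 = k := by omega
          rw [hq, hk, show 2 * k + 1 + 1 = 2 * (k + 1) by ring]
          exact land_odd_even k
        have hlor : m ||| (m + 1) = 2 * (m / 2 ||| (m / 2 + 1)) + 1 := by
          obtain ⟨k, hk⟩ : ∃ k, m = 2 * k + 1 := ⟨m / 2, by omega⟩
          have hq : m / 2 = k := by omega
          rw [hq, hk, show 2 * k + 1 + 1 = 2 * (k + 1) by ring]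
          exact lor_odd_even k
        by_cases hz : '0' ∈ binChars (m / 2)
        · -- flip branch on both levels
          have hrne : rfindZero (binChars (m / 2)) ≠ -1 :=
            fun hc => ((rfind_neg1_iff _).1 hc) hz
          have hb := rfind_bounds (binChars (m / 2))
          have hpv : rfindZero (binChars (m / 2)) = ((rfindZero (binChars (m / 2))).toNat : Int) := by
            omega
          have hplt : (rfindZero (binChars (m / 2))).toNat < (binChars (m / 2)).length := by omega
          have hflip : flipAt (binChars m) (rfindZero (binChars (m / 2))).toNat =
              flipAt (binChars (m / 2)) (rfindZero (binChars (m / 2))).toNat ++ ['1'] := by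
            rw [ht]
            simp only [flipAt]
            rw [List.take_append_of_le_length (by omega),
              List.drop_append_of_le_length (by omega)]
            simp
          have hAk : stepA ((m / 2 : Nat) : Int) =
              ((parseBin (flipAt (binChars (m / 2)) (rfindZero (binChars (m / 2))).toNat) : Nat) : Int) := by
            simp only [stepA, Int.toNat_natCast]
            rw [if_pos hrne]
          have hkland : m / 2 &&& (m / 2 + 1) ≠ 0 := (zero_mem_iff (m / 2) (by omega)).1 hz
          have hBk : stepB ((m / 2 : Nat) : Int) = ((m / 2 ||| (m / 2 + 1) : Nat) : Int) := by
            rw [stepB, if_neg, show (((m / 2 : Nat) : Int) + 1) = ((m / 2 + 1 : Nat) : Int) by push_cast; ring, int_lor_coe]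
            rintro ⟨-, hc⟩
            rw [show (((m / 2 : Nat) : Int) + 1) = ((m / 2 + 1 : Nat) : Int) by push_cast; ring,
              int_land_coe] at hc
            exact hkland (by exact_mod_cast hc)
          have hval : parseBin (flipAt (binChars (m / 2)) (rfindZero (binChars (m / 2))).toNat) =
              m / 2 ||| (m / 2 + 1) := by
            have := (hAk.symm.trans (IH (m / 2) (by omega))).trans hBk
            exact_mod_cast this
          have hA : stepA (m : Int) = ((2 * (m / 2 ||| (m / 2 + 1)) + 1 : Nat) : Int) := by
            simp only [stepA, Int.toNat_natCast, hr]
            rw [if_pos hrne]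
            conv_lhs => rw [hpv]
            rw [Int.toNat_natCast, hflip, parse_append, hval]
            norm_num
          rw [hA, stepB, if_neg, hcast1, int_lor_coe, hlor]
          rintro ⟨-, hc⟩
          rw [hcast1, int_land_coe] at hc
          have : m &&& (m + 1) = 0 := by exact_mod_cast hc
          rw [hland] at this
          omega
        · -- no '0' anywhere: m is all ones, m = 2^L - 1
          have hall : ∀ c ∈ binChars m, c = '1' := by
            intro c hc
            rcases binChars_digits m c hc with h1 | h1
            · exfalso
              rw [ht] at hc
              rcases List.mem_append.1 hc with h2 | h2
              · exact hz (h1 ▸ h2)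
              · rw [List.mem_singleton] at h2; rw [h2] at h1; exact absurd h1 (by decide)
            · exact h1
          have hrep : binChars m = List.replicate (binChars m).length '1' :=
            List.eq_replicate_of_mem hall
          have hm : m + 1 = 2 ^ (binChars m).length := by
            have hpm := parse_binChars m
            conv_lhs at hpm => rw [hrep]
            have h2 := parse_ones [] (binChars m).length
            simp only [List.nil_append, show parseBin ([] : List Char) = 0 from rfl] at h2
            norm_num at h2
            omega
          have hsl2 : 2 ≤ (binChars (m / 2)).length := by
            rw [binChars, if_neg (by omega : ¬ m / 2 < 2), List.length_append,
              List.length_singleton]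
            have := binChars_length_pos (m / 2 / 2)
            omega
          have hL2 : 3 ≤ (binChars m).length := by
            rw [ht, List.length_append, List.length_singleton]
            omega
          have hm3 : 7 ≤ m := by
            have : 2 ^ 2 ≤ 2 ^ ((binChars m).length - 1) :=
              Nat.pow_le_pow_right (by omega) (by omega)
            have h3 : 2 ^ (binChars m).length = 2 * 2 ^ ((binChars m).length - 1) := by
              rw [← pow_succ']
              congr 1
              omega
            omega
          have hrne : rfindZero (binChars m) = -1 := by
            rw [(rfind_neg1_iff _).2]
            rw [hrep]
            intro hc
            have := List.eq_of_mem_replicate hc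
            exact absurd this (by decide)
          have h1pow : (1:Nat) ≤ 2 ^ ((binChars m).length - 1) := Nat.one_le_two_pow
          have hpm := parse_binChars m
          have hA : stepA (m : Int) = ((3 * 2 ^ ((binChars m).length - 1) - 1 : Nat) : Int) := by
            simp only [stepA, Int.toNat_natCast, hrne, hpm]
            rw [if_neg (by simp), if_neg (by omega : ¬ ((m : Nat) : Int) = 1),
              if_neg (by omega : ¬ ((m : Nat) : Int) = 3)]
            have h2 := parse_ones ['1', '0'] ((binChars m).length - 1)
            simp only [show parseBin ['1', '0'] = 2 from rfl] at h2
            congr 1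
            omega
          have hmland : m &&& (m + 1) = 0 := by
            by_contra hc
            exact hz (by
              have := (zero_mem_iff m (by omega)).2 hc
              rw [ht] at this
              rcases List.mem_append.1 this with h2 | h2
              · exact h2
              · rw [List.mem_singleton] at h2; exact absurd h2 (by decide))
          have hB : stepB (m : Int) = 3 * 2 ^ ((binChars m).length - 1) - 1 := by
            rw [stepB, if_pos]
            · rw [Int.toNat_natCast, ← length_binChars m (by omega)]
            · constructor
              · omega
              · rw [hcast1, int_land_coe, hmland]; rfl
          rw [hA, hB]
          push_cast [Nat.cast_sub (by omega : (1:Nat) ≤ 3 * 2 ^ ((binChars m).length - 1))]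
          ring
      · -- EVEN m: rfind hits the final '0'; flip yields m + 1
        have ht : binChars m = binChars (m / 2) ++ ['0'] := by
          rw [hrec, if_neg ho]
        have hr : rfindZero (binChars m) = ((binChars (m / 2)).length : Int) := by
          rw [ht, rfind_append, if_pos rfl]
        have hflip : flipAt (binChars m) (binChars (m / 2)).length = binChars (m / 2) ++ ['1'] := by
          rw [ht]
          simp [flipAt, List.take_left, List.drop_append_of_le_length (by omega)]
        have hA : stepA (m : Int) = ((m + 1 : Nat) : Int) := by
          simp only [stepA, Int.toNat_natCast, hr]
          rw [if_pos (by omega : ((binChars (m / 2)).length : Int) ≠ -1), hflip, parse_append, hps]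
          norm_num
          omega
        have hland : m &&& (m + 1) = m := by
          obtain ⟨k, hk⟩ : ∃ k, m = 2 * k := ⟨m / 2, by omega⟩
          rw [hk, show 2 * k + 1 = 2 * k + 1 from rfl, land_even_odd]
        have hlor : m ||| (m + 1) = m + 1 := by
          obtain ⟨k, hk⟩ : ∃ k, m = 2 * k := ⟨m / 2, by omega⟩
          rw [hk, lor_even_odd]
        rw [hA, stepB, if_neg, hcast1, int_lor_coe, hlor]
        rintro ⟨-, hc⟩
        rw [hcast1, int_land_coe] at hc
        have : m &&& (m + 1) = 0 := by exact_mod_cast hc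
        omega

-- foldl-append is map
theorem foldl_append_map (f : Int → Int) (init : List Int) (l : List Int) :
    l.foldl (fun a n => a ++ [f n]) init = init ++ l.map f := by
  induction l generalizing init with
  | nil => simp
  | cons x t IH => simp [IH]

-- ===== VERDICT (by name: the statement is the Claim_ definition above) =====
theorem solution_spec : Claim_equal_solution := by
  intro numbers _ hpre
  unfold Spec_solution solution solution_alt
  rw [foldl_append_map, foldl_append_map]
  simp only [List.nil_append]
  apply List.map_congr_left
  intro n hn
  have h0 : 0 ≤ n := hpre n hn
  rw [show n = ((n.toNat : Nat) : Int) from (Int.toNat_of_nonneg h0).symm]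
  exact key n.toNat
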